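-- pv_equiv track=rewrite | github.com/Akane0721/UCSD-ECE143-Homework-24Fall | week2/word_processing.py | get_most_common_end
-- ===== SOURCE A (Python) =====
-- def get_most_common_end(words):
--     """
--     Get the most common ending letter
--
--     Args:
--         words (list): the list of words
--     """
--     assert isinstance(words, list)
--     freq = {}
--     for word in words:
--         if word[-1] in freq:
--             freq[word[-1]] += 1
--         else:
--             freq[word[-1]] = 1
--     return max(freq, key=freq.get)
-- ===== SOURCE B (Python) =====
-- def get_most_common_end(words):
--     """
--     Get the most common ending letter
--
--     Args:
--         words (list): the list of words
--     """
--     assert isinstance(words, list)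
--     return _best([word[-1] for word in words])[0]
--
--
-- def _best(lasts):
--     # Recursive selection: take the first letter, strip out all its occurrences,
--     # recursively find the best of the remainder, and keep whichever count wins
--     # (ties go to the earlier-occurring letter).
--     c = lasts[0]
--     rest = [x for x in lasts if x != c]
--     n = len(lasts) - len(rest)
--     if not rest:
--         return (c, n)
--     b, m = _best(rest)
--     return (c, n) if n >= m else (b, m)
-- ===== Notes on version B (the rewrite author's own statement) =====
-- stated objective: alternative
-- what changed: Replaced the frequency-dict build plus max over dict keys by a recursive selection: strip all occurrences of the first last-letter, recurse on the remainder, and keep whichever count is larger (ties to the earlier letter); no frequency table is built.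
import Mathlib
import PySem

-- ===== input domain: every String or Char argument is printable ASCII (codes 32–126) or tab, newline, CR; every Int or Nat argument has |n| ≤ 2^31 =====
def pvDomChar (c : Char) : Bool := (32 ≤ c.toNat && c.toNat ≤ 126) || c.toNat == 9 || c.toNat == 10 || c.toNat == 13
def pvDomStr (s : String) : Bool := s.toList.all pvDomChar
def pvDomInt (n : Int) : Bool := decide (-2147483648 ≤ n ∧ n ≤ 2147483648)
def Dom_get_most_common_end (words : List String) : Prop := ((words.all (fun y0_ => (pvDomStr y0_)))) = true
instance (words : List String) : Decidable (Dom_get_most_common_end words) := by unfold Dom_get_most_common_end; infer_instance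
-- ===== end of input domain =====

-- B replaces A's frequency-dict build + max over keys by a recursive selection: strip all
-- occurrences of the first last-letter, recurse on the remainder, keep the better count
-- (ties to the earlier letter). Alternative decomposition, no table.

-- ===== PORT A =====
def get_most_common_end (words : List String) : String :=
  let freq : PySem.Dict Char Int := words.foldl (fun d w =>
      match PySem.Str.pyGet? w (-1) with
      | some c => if d.contains c then d.insert c (d.getD c 0 + 1) else d.insert c 1
      | none => d) PySem.Dict.empty
  match PySem.List.max? (PySem.Dict.keys freq) (fun c => freq.getD c 0) with
  | some c => String.ofList [c]
  | none => ""

-- ===== PORT B =====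
-- port of _best: recursion on the list with all copies of the head letter removed
def bestRec (lasts : List Char) : Option (Char × Int) :=
  match lasts with
  | [] => none
  | c :: t =>
    let rest := (c :: t).filter (fun x => x ≠ c)
    let n : Int := ((c :: t).length : Int) - (rest.length : Int)
    match bestRec rest with
    | none => some (c, n)                                   -- "if not rest: return (c, n)"
    | some (b, m) => if n ≥ m then some (c, n) else some (b, m)
termination_by lasts.length
decreasing_by
  simp only [List.filter_cons, decide_not, ne_eq, List.length_cons]
  exact Nat.lt_succ_of_le (List.length_filter_le _ _)

def get_most_common_end_alt (words : List String) : String :=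
  match bestRec (words.filterMap (fun w => PySem.Str.pyGet? w (-1))) with
  | some (c, _) => String.ofList [c]
  | none => ""

-- ===== PRECONDITION & SPEC =====
-- Pre_ excludes exactly the inputs where A raises: the empty list (ValueError from max of an
-- empty dict) and lists containing an empty string (IndexError from word[-1]); B raises there too.
def Pre_get_most_common_end (words : List String) : Prop :=
  words ≠ [] ∧ ∀ w ∈ words, w ≠ ""
instance (words : List String) : Decidable (Pre_get_most_common_end words) := by
  unfold Pre_get_most_common_end; infer_instance
def pvWitness_get_most_common_end : List String := ["ab", "cb", "dc"]

def Spec_get_most_common_end (words : List String) (out : String) : Prop := out = get_most_common_end_alt words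
instance (words : List String) (out : String) : Decidable (Spec_get_most_common_end words out) := by unfold Spec_get_most_common_end; infer_instance

-- ===== CLAIM (what is proved, stated in full; the proofs are below) =====
def Claim_equal_get_most_common_end : Prop := ∀ (words : List String), Dom_get_most_common_end words → Pre_get_most_common_end words → Spec_get_most_common_end words (get_most_common_end words)

-- ===== LEMMAS AND PROOFS =====

-- A's frequency loop body is the standard counting insert.
lemma stepA_eq (d : PySem.Dict Char Int) (c : Char) :
    (if d.contains c then d.insert c (d.getD c 0 + 1) else d.insert c 1)
      = d.insert c (d.getD c 0 + 1) := by
  by_cases h : d.contains c = true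
  · simp [h]
  · have h' : d.contains c = false := by simpa using h
    rw [PySem.Dict.getD_of_not_contains d 0 h']
    simp [h']

-- A's freq dict is Counter(lasts), where lasts are the last letters that exist.
lemma freq_eq_counter (words : List String) :
    words.foldl (fun d w =>
      match PySem.Str.pyGet? w (-1) with
      | some c => if d.contains c then d.insert c (d.getD c 0 + 1) else d.insert c 1
      | none => d) (PySem.Dict.empty : PySem.Dict Char Int)
    = PySem.Dict.counter (words.filterMap (fun w => PySem.Str.pyGet? w (-1))) := by
  rw [← PySem.Dict.foldl_insert_getD_add_one_eq_counter, List.foldl_filterMap]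
  congr 1
  funext d w
  cases PySem.Str.pyGet? w (-1) with
  | none => rfl
  | some c => exact stepA_eq d c

-- Python's max returns the first maximal element; removing later duplicates
-- (whose keys coincide with their first occurrence's) does not change it.
lemma max?_ofList {α κ : Type} [BEq α] [LawfulBEq α] [LinearOrder κ]
    (xs : List α) (k : α → κ) :
    PySem.List.max? (PySem.Set.ofList xs) k = PySem.List.max? xs k := by
  induction xs using List.reverseRecOn with
  | nil => rfl
  | append_singleton xs x ih =>
    rw [PySem.Set.ofList_append_singleton, PySem.Set.add_eq_ite]
    by_cases hx : x ∈ PySem.Set.ofList xs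
    · have hmem : x ∈ xs := (PySem.Set.mem_ofList xs x).1 hx
      simp only [hx, if_true, ih]
      obtain ⟨m, hm⟩ : ∃ m, PySem.List.max? xs k = some m := by
        cases h : PySem.List.max? xs k with
        | none =>
          exact absurd (List.ne_nil_of_mem hmem) (by simpa using (PySem.List.max?_eq_none_iff xs k).1 h)
        | some m => exact ⟨m, rfl⟩
      have hle : k x ≤ k m := PySem.List.max?_isMax hm x hmem
      simp [PySem.List.max?, List.foldl_append] at hm ⊢
      rw [hm]
      simp [not_lt.2 hle]
    · simp only [hx, if_false]
      simp [PySem.List.max?, List.foldl_append] at ih ⊢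
      rw [ih]

-- Helper for B: removed occurrences vs. count (len(lasts) - len(rest) = count of c).
lemma filter_len_count (l : List Char) (c : Char) :
    (l.filter (fun x => x ≠ c)).length + l.count c = l.length := by
  induction l with
  | nil => simp
  | cons y t ih =>
    rw [List.filter_cons, List.count_cons]
    by_cases h : y = c
    · subst h
      rw [if_neg (by simp), beq_self_eq_true, if_pos rfl, List.length_cons]
      omega
    · rw [if_pos (by simp [h]), if_neg (by simp [h]), List.length_cons, List.length_cons]
      omega

-- First-extremal max, unfolded one element: the head wins iff nothing later beats it.
lemma max?_cons {α κ : Type} [LinearOrder κ] (k : α → κ) (c : α) (t : List α) :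
    PySem.List.max? (c :: t) k =
      if ∀ y ∈ t, k y ≤ k c then some c else PySem.List.max? t k := by
  induction t generalizing c with
  | nil => simp [PySem.List.max?]
  | cons y t' ih =>
    by_cases hcy : k c < k y
    · rw [if_neg (by push Not; exact ⟨y, by simp, hcy⟩)]
      show PySem.List.max? (c :: y :: t') k = PySem.List.max? (y :: t') k
      simp [PySem.List.max?, hcy]
    · have hstep : PySem.List.max? (c :: y :: t') k = PySem.List.max? (c :: t') k := by
        simp [PySem.List.max?, hcy]
      rw [hstep, ih c]
      by_cases hall : ∀ z ∈ t', k z ≤ k c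
      · rw [if_pos hall, if_pos]
        intro z hz
        rcases List.mem_cons.1 hz with rfl | hz'
        · exact le_of_not_gt hcy
        · exact hall z hz'
      · rw [if_neg hall, if_neg (by
          push Not at hall ⊢
          obtain ⟨z, hz, h⟩ := hall
          exact ⟨z, List.mem_cons_of_mem _ hz, h⟩), ih y]
        push Not at hall
        obtain ⟨z, hz, hgt⟩ := hall
        rw [if_neg]
        push Not
        exact ⟨z, hz, lt_of_le_of_lt (le_of_not_gt hcy) hgt⟩

-- max? only looks at key values of members.
lemma max?_congr {α κ : Type} [LinearOrder κ] (xs : List α) (k1 k2 : α → κ)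
    (h : ∀ x ∈ xs, k1 x = k2 x) :
    PySem.List.max? xs k1 = PySem.List.max? xs k2 := by
  induction xs with
  | nil => rfl
  | cons c t ih =>
    rw [max?_cons, max?_cons, ih (fun x hx => h x (List.mem_cons_of_mem _ hx))]
    have hc : k1 c = k2 c := h c (List.mem_cons_self ..)
    by_cases hall : ∀ y ∈ t, k2 y ≤ k2 c
    · rw [if_pos (fun y hy => by
        rw [h y (List.mem_cons_of_mem _ hy), hc]; exact hall y hy), if_pos hall]
    · rw [if_neg (by
        push Not at hall ⊢
        obtain ⟨z, hz, hlt⟩ := hall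
        exact ⟨z, hz, by rw [h z (List.mem_cons_of_mem _ hz), hc]; exact hlt⟩), if_neg hall]

-- Removing copies of an element strictly below the maximum keeps the first maximal element.
lemma max?_filter_ne {α κ : Type} [DecidableEq α] [LinearOrder κ] (k : α → κ) (c : α)
    (t : List α) (h : ∃ z ∈ t, k c < k z) :
    PySem.List.max? (t.filter (fun x => x ≠ c)) k = PySem.List.max? t k := by
  induction t with
  | nil => simp at h
  | cons y t' ih =>
    obtain ⟨z, hz, hzgt⟩ := h
    by_cases hyc : y = c
    · subst hyc
      have hz' : z ∈ t' := by
        rcases List.mem_cons.1 hz with rfl | hz'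
        · exact absurd hzgt (lt_irrefl _)
        · exact hz'
      rw [List.filter_cons_of_neg (by simp), ih ⟨z, hz', hzgt⟩, max?_cons, if_neg]
      push Not
      exact ⟨z, hz', hzgt⟩
    · rw [List.filter_cons_of_pos (by simp [hyc]), max?_cons, max?_cons k y t']
      by_cases hall : ∀ w ∈ t', k w ≤ k y
      · rw [if_pos hall, if_pos (fun w hw => hall w (List.mem_filter.1 hw).1)]
      · push Not at hall
        obtain ⟨w, hw, hwgt⟩ := hall
        have hbig : ∃ w ∈ t', k y < k w ∧ w ≠ c := by
          by_cases hyk : k c < k y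
          · rcases eq_or_ne w c with rfl | hwc
            · exact absurd (lt_trans hyk hwgt) (lt_irrefl _)
            · exact ⟨w, hw, hwgt, hwc⟩
          · have hzc : z ≠ c := fun hzc => absurd hzgt (by rw [hzc]; exact lt_irrefl _)
            have hz' : z ∈ t' := by
              rcases List.mem_cons.1 hz with rfl | hz'
              · exact absurd hzgt hyk
              · exact hz'
            exact ⟨z, hz', lt_of_le_of_lt (not_lt.1 hyk) hzgt, hzc⟩
        obtain ⟨w', hw', hw'gt, hw'c⟩ := hbig
        rw [if_neg (by push Not; exact ⟨w', List.mem_filter.2 ⟨hw', by simp [hw'c]⟩, hw'gt⟩),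
            if_neg (by push Not; exact ⟨w, hw, hwgt⟩)]
        apply ih
        by_cases hyk : k c < k y
        · exact ⟨w', hw', lt_trans hyk hw'gt⟩
        · rcases List.mem_cons.1 hz with rfl | hz'
          · exact absurd hzgt hyk
          · exact ⟨z, hz', hzgt⟩

-- B's recursive selection computes the first letter of maximal count, with that count.
lemma bestRec_eq (lasts : List Char) :
    bestRec lasts
      = (PySem.List.max? lasts (fun x => (lasts.count x : Int))).map
          (fun m => (m, (lasts.count m : Int))) := by
  generalize hL : lasts.length = N
  induction N using Nat.strong_induction_on generalizing lasts with
  | _ N IH =>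
    match lasts, hL with
    | [], _ => simp [bestRec, PySem.List.max?]
    | c :: t, hL =>
      have hrest : (c :: t).filter (fun x => x ≠ c) = t.filter (fun x => x ≠ c) := by
        simp
      have hlt : ((c :: t).filter (fun x => x ≠ c)).length < N := by
        rw [← hL, hrest, List.length_cons]
        exact Nat.lt_succ_of_le (List.length_filter_le _ _)
      have ih := IH _ hlt ((c :: t).filter (fun x => x ≠ c)) rfl
      set rest := (c :: t).filter (fun x => x ≠ c) with hrdef
      set k : Char → Int := fun x => ((c :: t).count x : Int) with hk
      have hn : ((c :: t).length : Int) - (rest.length : Int) = k c := by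
        have h := filter_len_count (c :: t) c
        rw [← hrdef] at h
        simp only [hk]
        omega
      have hkrest : ∀ x ∈ rest, ((rest.count x : Int)) = k x := by
        intro x hx
        have hxc : x ≠ c := by simpa using (List.mem_filter.1 hx).2
        rw [hrdef, List.count_filter]
        simp [hxc]
      have hmem_t : ∀ x ∈ rest, x ∈ t := by
        intro x hx
        have h1 := List.mem_filter.1 hx
        have hxc : x ≠ c := by simpa using h1.2
        rcases List.mem_cons.1 h1.1 with rfl | hxt
        · exact absurd rfl hxc
        · exact hxt
      rw [bestRec, ← hrdef, max?_cons]
      by_cases hall : ∀ y ∈ t, k y ≤ k c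
      · rw [if_pos hall]
        cases hb : bestRec rest with
        | none => simp only [hn, hk]; rfl
        | some p =>
          obtain ⟨b, m⟩ := p
          rw [hb] at ih
          cases hmax : PySem.List.max? rest (fun x => ((rest.count x : Int))) with
          | none => rw [hmax] at ih; simp at ih
          | some b' =>
            rw [hmax] at ih
            simp only [Option.map_some] at ih
            obtain ⟨rfl, rfl⟩ := Prod.mk.injEq .. ▸ Option.some.injEq .. ▸ ih
            have hbr : b ∈ rest := PySem.List.max?_mem hmax
            have hle : ((rest.count b : Int)) ≤ k c := by
              rw [hkrest b hbr]
              exact hall b (hmem_t b hbr)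
            dsimp only
            rw [if_pos (by rw [ge_iff_le, hn]; exact hle), hn]
            simp [hk]
      · rw [if_neg hall]
        push Not at hall
        obtain ⟨y, hy, hygt⟩ := hall
        have hyc : y ≠ c := fun h => absurd hygt (by rw [h]; exact lt_irrefl _)
        have hyr : y ∈ rest :=
          List.mem_filter.2 ⟨List.mem_cons_of_mem _ hy, by simp [hyc]⟩
        have h1 : PySem.List.max? t k = PySem.List.max? rest k := by
          have hmf := max?_filter_ne k c t ⟨y, hy, hygt⟩
          rw [← hrest] at hmf
          exact hmf.symm
        have h2 : PySem.List.max? rest k = PySem.List.max? rest (fun x => ((rest.count x : Int))) :=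
          (max?_congr rest _ k hkrest).symm
        cases hmax : PySem.List.max? rest (fun x => ((rest.count x : Int))) with
        | none =>
          exact absurd (List.ne_nil_of_mem hyr)
            (by simpa using (PySem.List.max?_eq_none_iff rest _).1 hmax)
        | some b =>
          rw [hmax] at ih
          simp only [Option.map_some] at ih
          have hbr : b ∈ rest := PySem.List.max?_mem hmax
          have hyb : k y ≤ k b := by
            have := PySem.List.max?_isMax hmax y hyr
            rwa [hkrest y hyr, hkrest b hbr] at this
          simp only [ih]
          have hnm : ¬ (((c :: t).length : Int) - (rest.length : Int) ≥ ((rest.count b : Int))) := by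
            rw [hn, hkrest b hbr]
            exact not_le.2 (lt_of_lt_of_le hygt hyb)
          rw [if_neg hnm, h1, h2, hmax]
          simp only [Option.map_some]
          rw [hkrest b hbr]

-- ===== VERDICT (by name: the statement is the Claim_ definition above) =====
theorem get_most_common_end_spec : Claim_equal_get_most_common_end := by
  intro words _ _
  show get_most_common_end words = get_most_common_end_alt words
  unfold get_most_common_end get_most_common_end_alt
  rw [freq_eq_counter]
  simp only [PySem.Dict.keys_counter, PySem.Dict.getD_counter, max?_ofList,
    bestRec_eq]
  cases PySem.List.max? (words.filterMap fun w => PySem.Str.pyGet? w (-1))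
      (fun c => ((words.filterMap fun w => PySem.Str.pyGet? w (-1)).count c : Int)) <;> rfl
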